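-- pv_equiv track=rewrite | github.com/TruCol/Market_analysis | code/project1/src/Model_top_down.py | sum_revenues
-- ===== SOURCE A (Python) =====
-- def sum_revenues(x_series):
--     summed_series = []
--     for i in range(0, len(x_series[0])):
--         summed = 0
--         for j in range(0, len(x_series)):
--             summed = summed + x_series[j][i]
--
--         summed_series.append(summed)
--     return summed_series
-- ===== SOURCE B (Python) =====
-- def sum_revenues(x_series):
--     n = len(x_series[0])
--     summed_series = [0] * n
--     for series in x_series:
--         summed_series = [summed_series[i] + series[i] for i in range(n)]
--     return summed_series
-- ===== Notes on version B (the rewrite author's own statement) =====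
-- stated objective: alternative
-- what changed: Interchanges the loop nesting: one row-major pass over the series maintaining a running accumulator vector (rebuilt by a comprehension per series), instead of computing each column independently with an inner indexed scan over all series.
import Mathlib
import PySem

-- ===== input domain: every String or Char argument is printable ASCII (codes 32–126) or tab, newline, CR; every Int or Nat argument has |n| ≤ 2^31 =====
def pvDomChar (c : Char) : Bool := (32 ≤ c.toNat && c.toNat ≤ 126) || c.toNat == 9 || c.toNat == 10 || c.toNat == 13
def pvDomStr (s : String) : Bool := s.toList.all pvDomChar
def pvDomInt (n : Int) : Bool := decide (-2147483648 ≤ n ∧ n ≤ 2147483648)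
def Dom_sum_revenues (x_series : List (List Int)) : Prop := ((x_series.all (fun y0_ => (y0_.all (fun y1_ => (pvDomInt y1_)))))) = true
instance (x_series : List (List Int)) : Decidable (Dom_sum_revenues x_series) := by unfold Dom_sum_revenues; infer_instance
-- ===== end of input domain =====

-- B interchanges the loop nesting: one row-major pass over the series maintaining a running
-- accumulator vector, instead of computing each column independently by an inner scan over
-- all series (objective: alternative decomposition, same asymptotic cost).

-- ===== PORT A =====
-- Column-major: for each column index i, an inner loop over all series sums x_series[j][i].
def sum_revenues (x_series : List (List Int)) : List Int :=
  (List.range (x_series.getD 0 []).length).foldl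
    (fun summed_series i =>
      summed_series ++
        [(List.range x_series.length).foldl
          (fun summed j => summed + ((x_series.getD j []).getD i 0)) 0])
    []

-- ===== PORT B =====
-- Row-major: start from a zero vector of length n and fold each series into the accumulator.
def sum_revenues_alt (x_series : List (List Int)) : List Int :=
  x_series.foldl
    (fun summed_series series =>
      (List.range (x_series.getD 0 []).length).map
        (fun i => summed_series.getD i 0 + series.getD i 0))
    (List.replicate (x_series.getD 0 []).length 0)

-- ===== PRECONDITION & SPEC =====
-- Pre_ excludes exactly the inputs where the Python A raises IndexError: the empty list
-- (x_series[0]) and ragged inputs where some series is shorter than the first one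
-- (x_series[j][i]); B raises IndexError on exactly the same inputs.
def Pre_sum_revenues (x_series : List (List Int)) : Prop :=
  x_series ≠ [] ∧ ∀ r ∈ x_series, (x_series.headI).length ≤ r.length
instance (x_series : List (List Int)) : Decidable (Pre_sum_revenues x_series) := by
  unfold Pre_sum_revenues; infer_instance

def pvWitness_sum_revenues : List (List Int) := [[1, 2], [3, 4]]

def Spec_sum_revenues (x_series : List (List Int)) (out : List Int) : Prop := out = sum_revenues_alt x_series
instance (x_series : List (List Int)) (out : List Int) : Decidable (Spec_sum_revenues x_series out) := by unfold Spec_sum_revenues; infer_instance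

-- ===== CLAIM (what is proved, stated in full; the proofs are below) =====
def Claim_equal_sum_revenues : Prop := ∀ (x_series : List (List Int)), Dom_sum_revenues x_series → Pre_sum_revenues x_series → Spec_sum_revenues x_series (sum_revenues x_series)

-- ===== LEMMAS AND PROOFS =====

-- column sum of a list of rows at index i (with Python-style default 0 off the end)
def pvColSum : List (List Int) → Nat → Int
  | [], _ => 0
  | r :: rs, i => r.getD i 0 + pvColSum rs i

theorem pv_foldl_append {α β : Type} (f : α → β) :
    ∀ (l : List α) (acc : List β),
      l.foldl (fun a i => a ++ [f i]) acc = acc ++ l.map f := by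
  intro l
  induction l with
  | nil => intro acc; simp
  | cons x xs ih => intro acc; simp [List.foldl, ih]

theorem pv_inner_colsum (i : Nat) :
    ∀ (xs : List (List Int)) (a : Int),
      (List.range xs.length).foldl (fun s j => s + ((xs.getD j []).getD i 0)) a
        = a + pvColSum xs i := by
  intro xs
  induction xs with
  | nil => intro a; simp [pvColSum]
  | cons r rs ih =>
    intro a
    have h : List.range (r :: rs).length = 0 :: (List.range rs.length).map Nat.succ := by
      simp [List.range_succ_eq_map]
    rw [h]
    simp only [List.foldl_cons, List.foldl_map]
    have h0 : (((r :: rs).getD 0 []).getD i 0) = r.getD i 0 := by simp [List.getD]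
    rw [h0]
    have : ((List.range rs.length).foldl
        (fun s j => s + (((r :: rs).getD (Nat.succ j) []).getD i 0)) (a + r.getD i 0))
        = (List.range rs.length).foldl
            (fun s j => s + ((rs.getD j []).getD i 0)) (a + r.getD i 0) := by
      simp [List.getD]
    rw [this, ih]
    simp [pvColSum]
    ring

theorem pv_getD_map_range (f : Nat → Int) (n i : Nat) (h : i < n) :
    ((List.range n).map f).getD i 0 = f i := by
  rw [List.getD_eq_getElem?_getD, List.getElem?_map, List.getElem?_range h]
  rfl

theorem pv_b_invariant (n : Nat) :
    ∀ (xs : List (List Int)) (f : Nat → Int),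
      xs.foldl
        (fun summed_series series =>
          (List.range n).map (fun i => summed_series.getD i 0 + series.getD i 0))
        ((List.range n).map f)
      = (List.range n).map (fun i => f i + pvColSum xs i) := by
  intro xs
  induction xs with
  | nil => intro f; simp [pvColSum]
  | cons r rs ih =>
    intro f
    simp only [List.foldl_cons]
    have hstep : (List.range n).map (fun i => (((List.range n).map f).getD i 0) + r.getD i 0)
        = (List.range n).map (fun i => f i + r.getD i 0) := by
      apply List.map_congr_left
      intro i hi
      rw [pv_getD_map_range f n i (List.mem_range.mp hi)]
    rw [hstep, ih (fun i => f i + r.getD i 0)]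
    apply List.map_congr_left
    intro i _
    simp [pvColSum]
    ring

theorem pv_both_colsum (xs : List (List Int)) :
    sum_revenues xs = sum_revenues_alt xs := by
  unfold sum_revenues sum_revenues_alt
  set n := (xs.getD 0 []).length with hn
  rw [pv_foldl_append]
  have hrepl : (List.replicate n (0 : Int)) = (List.range n).map (fun _ => 0) := by
    simp
  rw [hrepl, pv_b_invariant n xs (fun _ => 0)]
  simp only [List.nil_append]
  apply List.map_congr_left
  intro i _
  rw [pv_inner_colsum i xs 0]

-- ===== VERDICT (by name: the statement is the Claim_ definition above) =====
theorem sum_revenues_spec : Claim_equal_sum_revenues := by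
  intro xs _ _
  unfold Spec_sum_revenues
  exact pv_both_colsum xs
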